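-- pv_equiv track=rewrite | github.com/pypi-data/pypi-mirror-379 | packages/netintel-ocr/netintel_ocr-0.1.18.2-cp311-cp311-manylinux2014_x86_64.manylinux_2_17_x86_64.whl/netintel_ocr/diagram_detection/improved_flow_processor.py | _format_detailed_elements
-- ===== SOURCE A (Python) =====
-- from typing import Dict, Any, List, Optional, Tuple
--
-- def _format_detailed_elements(extraction: Dict[str, Any]) -> str:
--     """Format detailed element list."""
--     parts = ["### Detailed Elements\n"]
--
--     elements = extraction.get('elements', [])
--
--     # Group by type
--     by_type = {}
--     for elem in elements:
--         elem_type = elem.get('type', 'unknown')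
--         if elem_type not in by_type:
--             by_type[elem_type] = []
--         by_type[elem_type].append(elem)
--
--     type_names = {
--         'start': 'Start Points',
--         'end': 'End Points',
--         'process': 'Process Steps',
--         'decision': 'Decision Points',
--         'data': 'Data Elements'
--     }
--
--     for elem_type, type_elements in by_type.items():
--         if type_elements:
--             type_name = type_names.get(elem_type, elem_type.title())
--             parts.append(f"**{type_name}**:")
--             for elem in type_elements:
--                 label = elem.get('label', 'Unnamed')
--                 if len(label) > 100:
--                     label = label[:97] + "..."
--                 parts.append(f"- {label}")
--             parts.append("")
--
--     return '\n'.join(parts)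
-- ===== SOURCE B (Python) =====
-- def _format_detailed_elements(extraction):
--     """Format detailed element list."""
--     parts = ["### Detailed Elements\n"]
--     elements = extraction.get('elements', [])
--
--     type_names = {
--         'start': 'Start Points',
--         'end': 'End Points',
--         'process': 'Process Steps',
--         'decision': 'Decision Points',
--         'data': 'Data Elements'
--     }
--
--     # ordered list of distinct types (first-seen order); re-scan elements per type
--     for elem_type in dict.fromkeys(e.get('type', 'unknown') for e in elements):
--         parts.append(f"**{type_names.get(elem_type, elem_type.title())}**:")
--         for elem in elements:
--             if elem.get('type', 'unknown') == elem_type: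
--                 label = elem.get('label', 'Unnamed')
--                 if len(label) > 100:
--                     label = label[:97] + "..."
--                 parts.append(f"- {label}")
--         parts.append("")
--
--     return '\n'.join(parts)
-- ===== Notes on version B (the rewrite author's own statement) =====
-- stated objective: alternative
-- what changed: Drops the by_type grouping dict entirely: B first builds the ordered list of distinct element types (dict.fromkeys) and then re-scans the element list once per type, formatting matches directly; A builds a type->elements index in one pass and walks its items.
import Mathlib
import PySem

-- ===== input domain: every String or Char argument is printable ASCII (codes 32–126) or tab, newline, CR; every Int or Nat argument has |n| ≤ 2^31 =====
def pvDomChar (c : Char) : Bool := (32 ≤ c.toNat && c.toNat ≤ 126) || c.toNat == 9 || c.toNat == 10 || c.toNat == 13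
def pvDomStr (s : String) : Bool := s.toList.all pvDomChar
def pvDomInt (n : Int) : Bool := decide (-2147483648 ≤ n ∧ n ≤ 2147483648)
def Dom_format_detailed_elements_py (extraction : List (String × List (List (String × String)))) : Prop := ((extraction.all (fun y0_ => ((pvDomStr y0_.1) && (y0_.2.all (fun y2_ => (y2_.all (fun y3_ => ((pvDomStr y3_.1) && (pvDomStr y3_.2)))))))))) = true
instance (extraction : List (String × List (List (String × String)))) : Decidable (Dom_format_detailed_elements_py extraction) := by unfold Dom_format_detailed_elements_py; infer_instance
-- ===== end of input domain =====

-- B drops A's by_type grouping dict: it walks the ordered list of distinct types and re-scans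
-- the element list once per type (same output, same first-seen type order; not faster).


-- ===== PORT A =====
-- shared helpers (used verbatim by both Pythons): elem.get('type','unknown'),
-- str.title() (exact on ASCII: a letter after a non-letter is uppercased, after a letter lowercased),
-- and the '- {label}' line with its >100 / [:97]+'...' truncation.
def pvTypeOf (e : List (String × String)) : String :=
  (PySem.Dict.ofList e).getD "type" "unknown"

def pvTitleChars : List Char → Bool → List Char
  | [], _ => []
  | c :: cs, prev =>
      (if PySem.Chars.isalpha c then
        (if prev then PySem.Chars.lowerChar c else PySem.Chars.upperChar c)
       else c) :: pvTitleChars cs (PySem.Chars.isalpha c)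

def pvTypeNames : PySem.Dict String String :=
  PySem.Dict.ofList [("start", "Start Points"), ("end", "End Points"),
    ("process", "Process Steps"), ("decision", "Decision Points"), ("data", "Data Elements")]

-- f"**{type_names.get(t, t.title())}**:"
def pvHeader (t : String) : List Char :=
  "**".toList ++ (pvTypeNames.getD t (String.ofList (pvTitleChars t.toList false))).toList ++ "**:".toList

-- label = elem.get('label','Unnamed'); truncate; f"- {label}"
def pvFmtElem (e : List (String × String)) : List Char :=
  let label := ((PySem.Dict.ofList e).getD "label" "Unnamed").toList
  let label := if label.length > 100 then label.take 97 ++ "...".toList else label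
  "- ".toList ++ label

-- the grouping loop body: 'if t not in by_type: by_type[t] = []' ; 'by_type[t].append(elem)'
def pvGroupStep (d : PySem.Dict String (List (List (String × String))))
    (e : List (String × String)) : PySem.Dict String (List (List (String × String))) :=
  let t := pvTypeOf e
  let d' := if d.contains t then d else d.insert t []
  d'.insert t (d'.getD t [] ++ [e])

def format_detailed_elements_py (extraction : List (String × List (List (String × String)))) : String :=
  let parts : List (List Char) := ["### Detailed Elements\n".toList]
  let elements := (PySem.Dict.ofList extraction).getD "elements" []
  let byType := elements.foldl pvGroupStep PySem.Dict.empty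
  let parts := byType.items.foldl (fun parts p =>
    if p.2 ≠ [] then
      let parts := parts ++ [pvHeader p.1]
      let parts := p.2.foldl (fun parts e => parts ++ [pvFmtElem e]) parts
      parts ++ [[]]
    else parts) parts
  String.ofList (PySem.Chars.join "\n".toList parts)

-- ===== PORT B =====
def format_detailed_elements_py_alt (extraction : List (String × List (List (String × String)))) : String :=
  let parts : List (List Char) := ["### Detailed Elements\n".toList]
  let elements := (PySem.Dict.ofList extraction).getD "elements" []
  let types := PySem.List.dedup (elements.map pvTypeOf)
  let parts := types.foldl (fun parts t =>
    let parts := parts ++ [pvHeader t]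
    let parts := elements.foldl (fun parts e =>
      if pvTypeOf e == t then parts ++ [pvFmtElem e] else parts) parts
    parts ++ [[]]) parts
  String.ofList (PySem.Chars.join "\n".toList parts)

-- ===== PRECONDITION & SPEC =====
def Spec_format_detailed_elements_py (extraction : List (String × List (List (String × String)))) (out : String) : Prop := out = format_detailed_elements_py_alt extraction
instance (extraction : List (String × List (List (String × String)))) (out : String) : Decidable (Spec_format_detailed_elements_py extraction out) := by unfold Spec_format_detailed_elements_py; infer_instance

-- ===== CLAIM (what is proved, stated in full; the proofs are below) =====
def Claim_equal_format_detailed_elements_py : Prop := ∀ (extraction : List (String × List (List (String × String)))), Dom_format_detailed_elements_py extraction → Spec_format_detailed_elements_py extraction (format_detailed_elements_py extraction)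

-- ===== LEMMAS AND PROOFS =====

-- A's grouping dict, characterised: its items are the distinct types in first-seen order,
-- each paired with the sublist of elements of that type.
theorem items_groupFold (es : List (List (String × String))) :
    (es.foldl pvGroupStep PySem.Dict.empty).items
      = (PySem.List.dedup (es.map pvTypeOf)).map
          (fun t => (t, es.filter (fun e => pvTypeOf e == t))) := by
  induction es using List.reverseRecOn with
  | nil => rfl
  | append_singleton es e ih =>
    rw [List.foldl_append]
    set t := pvTypeOf e with ht
    set D := es.foldl pvGroupStep PySem.Dict.empty with hD
    have hkeys : D.keys = PySem.List.dedup (es.map pvTypeOf) := by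
      show D.items.map (·.1) = _
      rw [ih, List.map_map]; simp [Function.comp_def]
    have hnd : D.keys.Nodup := by rw [hkeys]; exact PySem.List.nodup_dedup _
    have hcont : D.contains t = decide (t ∈ PySem.List.dedup (es.map pvTypeOf)) := by
      rw [PySem.Dict.contains_eq_decide_mem_keys, hkeys]
    have hmapeq : (es ++ [e]).map pvTypeOf = es.map pvTypeOf ++ [t] := by
      simp [ht]
    have hded : PySem.List.dedup (es.map pvTypeOf ++ [t])
        = PySem.Set.add (PySem.List.dedup (es.map pvTypeOf)) t := by
      simp [PySem.List.dedup_eq_ofList, PySem.Set.ofList_append_singleton]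
    by_cases hm : t ∈ es.map pvTypeOf
    · -- t already seen: the dict overwrites in place, the dedup list is unchanged
      have hmG : t ∈ PySem.List.dedup (es.map pvTypeOf) := by
        simpa [PySem.List.mem_dedup] using hm
      have hcT : D.contains t = true := by rw [hcont]; simpa using hmG
      have hitem : (t, es.filter (fun e => pvTypeOf e == t)) ∈ D.items := by
        rw [ih]; exact List.mem_map_of_mem hmG
      have hgetD : D.getD t [] = es.filter (fun e => pvTypeOf e == t) :=
        PySem.Dict.getD_of_mem_items D hitem hnd []
      show ((if D.contains t then D else D.insert t []).insert t
        ((if D.contains t then D else D.insert t []).getD t [] ++ [e])).items = _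
      rw [hcT]; simp only [ite_true]
      rw [hgetD, PySem.Dict.items_insert_of_contains D _ hcT, ih]
      rw [hmapeq, hded, PySem.Set.add_of_mem hmG, List.map_map]
      apply List.map_congr_left
      intro t' ht'
      by_cases he : t' = t
      · subst he
        simp [List.filter_append, ht]
      · have hne : pvTypeOf e ≠ t' := by rw [← ht]; exact fun h => he (h ▸ rfl)
        simp [List.filter_append, he, hne]
    · -- fresh type: appended at the end of both the dict and the dedup list
      have hmG : t ∉ PySem.List.dedup (es.map pvTypeOf) := by
        simpa [PySem.List.mem_dedup] using hm
      have hcT : D.contains t = false := by rw [hcont]; simpa using hmG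
      show ((if D.contains t then D else D.insert t []).insert t
        ((if D.contains t then D else D.insert t []).getD t [] ++ [e])).items = _
      rw [hcT]; simp only [Bool.false_eq_true, if_false]
      rw [PySem.Dict.getD_insert_self, PySem.Dict.insert_insert_self, List.nil_append]
      rw [PySem.Dict.items_insert_of_not_contains D _ hcT, ih]
      rw [hmapeq, hded, PySem.Set.add_of_not_mem hmG, List.map_append]
      congr 1
      · apply List.map_congr_left
        intro t' ht'
        have hne : pvTypeOf e ≠ t' := by
          rw [← ht]; intro h; exact hmG (h ▸ ht')
        simp [List.filter_append, hne]
      · simp only [List.filter_append, ht]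
        simp
        intro a ha h
        apply hm
        rw [ht, ← h]
        exact List.mem_map_of_mem ha

theorem format_detailed_elements_py_spec' (extraction : List (String × List (List (String × String)))) :
    format_detailed_elements_py extraction = format_detailed_elements_py_alt extraction := by
  unfold format_detailed_elements_py format_detailed_elements_py_alt
  dsimp only
  set elements := (PySem.Dict.ofList extraction).getD "elements" [] with hel
  rw [items_groupFold, List.foldl_map]
  refine congrArg _ (congrArg _ (PySem.List.foldl_congr_mem _ _ _ _ ?_))
  intro parts t htG
  have hmem : t ∈ elements.map pvTypeOf := by
    simpa [PySem.List.mem_dedup] using htG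
  obtain ⟨e0, he0, he0t⟩ := List.mem_map.mp hmem
  have hne : elements.filter (fun e => pvTypeOf e == t) ≠ [] := by
    intro h
    have : e0 ∈ elements.filter (fun e => pvTypeOf e == t) :=
      List.mem_filter.mpr ⟨he0, by simp [he0t]⟩
    simp [h] at this
  dsimp only
  rw [if_pos hne]
  rw [PySem.List.foldl_append_singleton_eq_map, PySem.List.foldl_append_if]

-- ===== VERDICT (by name: the statement is the Claim_ definition above) =====
theorem format_detailed_elements_py_spec : Claim_equal_format_detailed_elements_py := by
  intro extraction _
  exact format_detailed_elements_py_spec' extraction
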